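-- pv_equiv track=rewrite | github.com/vaibhavkumar1517/Coding-in-Python | CSES4.py | compute
-- ===== SOURCE A (Python) =====
-- def compute(arr):
--     if len(arr)==1:
--         return 0
--     ans = 0
--     mx = arr[0]
--     for i in range(1,len(arr)):
--         if arr[i]>mx:
--             mx = arr[i]
--         ans = ans + (mx-arr[i])
--
--     return ans
-- ===== SOURCE B (Python) =====
-- def compute(arr):
--     # Contribution counting: visit indices in decreasing order of value; each new
--     # leftmost index j seen covers positions j..mi-1 as their prefix maximum, so
--     # its value contributes value*(mi-j); subtract sum(arr) at the end.
--     order = sorted(range(len(arr)), key=lambda i: arr[i], reverse=True)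
--     total = 0
--     mi = len(arr)
--     for j in order:
--         if j < mi:
--             total += arr[j] * (mi - j)
--             mi = j
--     return total - sum(arr)
-- ===== Notes on version B (the rewrite author's own statement) =====
-- stated objective: alternative
-- what changed: B replaces the left-to-right running-max accumulation with contribution counting: it sorts the indices by value in descending order and scans them keeping the minimal index seen, adding value*(covered span) for each new leftmost index, then subtracts the list sum.
-- crash fix: On the empty list A raises IndexError at its first-element read; B naturally returns 0 (empty sort, empty sum). — e.g. on compute([]): A raises IndexError, B returns 0
import Mathlib
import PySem

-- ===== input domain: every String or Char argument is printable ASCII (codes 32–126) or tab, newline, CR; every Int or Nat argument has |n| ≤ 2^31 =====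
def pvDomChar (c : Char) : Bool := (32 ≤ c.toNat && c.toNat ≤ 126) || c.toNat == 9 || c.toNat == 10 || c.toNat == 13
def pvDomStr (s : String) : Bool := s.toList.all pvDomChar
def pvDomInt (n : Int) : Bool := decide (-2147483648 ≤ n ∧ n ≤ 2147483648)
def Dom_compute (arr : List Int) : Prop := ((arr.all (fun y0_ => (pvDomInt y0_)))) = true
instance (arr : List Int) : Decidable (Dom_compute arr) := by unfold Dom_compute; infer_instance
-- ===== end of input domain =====

-- B replaces A's running-max accumulation with contribution counting over indices sorted
-- by value (descending): each new leftmost index j covers positions j..mi-1 as their prefix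
-- maximum. Return values agree on all nonempty lists; on [] A raises IndexError, B returns 0.

-- ===== PORT A =====
def compute (arr : List Int) : Int :=
  if arr.length = 1 then 0
  else
    match PySem.List.pyGet? arr 0 with
    | none => 0  -- unreachable under Pre_compute (empty list: Python raises IndexError)
    | some m0 =>
      let s := (PySem.List.pyRange 1 arr.length 1).foldl
        (fun (s : Int × Int) i =>
          let ai := PySem.List.pyGetD arr i 0
          let mx := if ai > s.2 then ai else s.2
          (s.1 + (mx - ai), mx)) (0, m0)
      s.1

-- ===== PORT B =====
def compute_alt (arr : List Int) : Int :=
  let order := PySem.List.sorted (PySem.List.pyRange 0 arr.length 1)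
    (fun i => PySem.List.pyGetD arr i 0) true
  let s := order.foldl
    (fun (s : Int × Int) j =>
      if j < s.2 then (s.1 + PySem.List.pyGetD arr j 0 * (s.2 - j), j) else s)
    (0, (arr.length : Int))
  s.1 - arr.sum

-- ===== PRECONDITION & SPEC =====
-- Pre_ excludes only the empty list, on which Python A raises IndexError reading its first element.
def Pre_compute (arr : List Int) : Prop := arr ≠ []
instance (arr : List Int) : Decidable (Pre_compute arr) := by unfold Pre_compute; infer_instance
def pvWitness_compute : List Int := [3, 1, 4]

-- On the empty list A raises IndexError at its first-element read; B naturally returns 0 (empty sort, empty sum).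
def Raises_compute (arr : List Int) : Prop := arr = []
instance (arr : List Int) : Decidable (Raises_compute arr) := by unfold Raises_compute; infer_instance
def pvRaiseWitness_compute : List Int := []
def pvRaiseWitnessOut_compute : Int := 0

def Spec_compute (arr : List Int) (out : Int) : Prop := out = compute_alt arr
instance (arr : List Int) (out : Int) : Decidable (Spec_compute arr out) := by unfold Spec_compute; infer_instance

-- ===== CLAIM (what is proved, stated in full; the proofs are below) =====
def Claim_equal_compute : Prop := ∀ (arr : List Int), Dom_compute arr → Pre_compute arr → Spec_compute arr (compute arr)
def Claim_raises_compute : Prop := (∀ (arr : List Int), Dom_compute arr → Raises_compute arr → ¬ Pre_compute arr) ∧ (Dom_compute (pvRaiseWitness_compute) ∧ Raises_compute (pvRaiseWitness_compute) ∧ compute_alt (pvRaiseWitness_compute) = pvRaiseWitnessOut_compute)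

-- ===== LEMMAS AND PROOFS =====

-- The prefix-maximum list of a :: t (pml m t = prefix maxima of t seeded with m).
def pml : Int → List Int → List Int
  | _, [] => []
  | m, x :: t => (max m x) :: pml (max m x) t

theorem length_pml (m : Int) (t : List Int) : (pml m t).length = t.length := by
  induction t generalizing m with
  | nil => rfl
  | cons x t ih => simp [pml, ih]

-- A-side: the fold accumulates sum(pml) - sum(tail).
theorem pv_A_fold (t : List Int) (ans m : Int) :
    (t.foldl (fun (s : Int × Int) x =>
        let mx := if x > s.2 then x else s.2
        (s.1 + (mx - x), mx)) (ans, m)).1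
    = ans + (pml m t).sum - t.sum := by
  induction t generalizing ans m with
  | nil => simp [pml]
  | cons x t ih =>
    simp only [List.foldl_cons, pml, List.sum_cons]
    rw [ih]
    have : (if x > m then x else m) = max m x := by omega
    rw [this]
    ring

-- getD of the prefix-max list = running max of the prefix.
theorem pml_getD (a : Int) (t : List Int) (i : Nat) (hi : i ≤ t.length) :
    (a :: pml a t).getD i 0 = (t.take i).foldl max a := by
  induction t generalizing a i with
  | nil =>
    have : i = 0 := by simpa using hi
    subst this; simp
  | cons x u ih =>
    cases i with
    | zero => simp
    | succ k =>
      have := ih (max a x) k (by simpa using hi)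
      simpa [pml] using this

theorem foldl_max_le (l : List Int) (s v : Int) (hs : s ≤ v) (h : ∀ x ∈ l, x ≤ v) :
    l.foldl max s ≤ v := by
  induction l generalizing s with
  | nil => simpa
  | cons x t ih =>
    simp only [List.foldl_cons]
    exact ih _ (by have := h x (by simp); omega) (fun y hy => h y (by simp [hy]))

-- lower bound: any element of the prefix is ≤ the prefix max there.
theorem pm_lower (a : Int) (t : List Int) (j i : Nat) (hj : j ≤ i) (hi : i < t.length + 1) :
    (a :: t).getD j 0 ≤ (a :: pml a t).getD i 0 := by
  rw [pml_getD a t i (by omega)]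
  cases j with
  | zero => simpa using (PySem.List.le_foldl_max (t.take i) a).1
  | succ k =>
    have hk : k < i := by omega
    have hkt : k < t.length := by omega
    have hmem : t[k] ∈ t.take i := by
      rw [List.mem_take_iff_getElem]
      exact ⟨k, by omega, by simp⟩
    have := (PySem.List.le_foldl_max (t.take i) a).2 _ hmem
    simpa [List.getD, List.getElem?_eq_getElem hkt] using this

-- exact value: if arr[j] dominates arr[0..i] and j ≤ i, the prefix max at i is arr[j].
theorem pm_exact (a : Int) (t : List Int) (j i : Nat) (hj : j ≤ i) (hi : i < t.length + 1)
    (hd : ∀ k : Nat, k ≤ i → (a :: t).getD k 0 ≤ (a :: t).getD j 0) :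
    (a :: pml a t).getD i 0 = (a :: t).getD j 0 := by
  refine le_antisymm ?_ (pm_lower a t j i hj hi)
  rw [pml_getD a t i (by omega)]
  refine foldl_max_le _ _ _ (by simpa using hd 0 (by omega)) ?_
  intro x hx
  rw [List.mem_take_iff_getElem] at hx
  obtain ⟨k, hk, rfl⟩ := hx
  have hk' : k + 1 ≤ i := by omega
  have hkt : k < t.length := by omega
  have := hd (k + 1) hk'
  simpa [List.getD, List.getElem?_eq_getElem hkt] using this

-- B-side invariant: folding the descending-by-value index list from state (total, mi),
-- where every index < mi is still unprocessed, adds the prefix-max sum over [0, mi).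
theorem pv_B_inv (a : Int) (t : List Int) (l : List Int) (total : Int) (mi : Nat)
    (hmi : mi ≤ t.length + 1)
    (hp : l.Pairwise (fun p q => PySem.List.pyGetD (a :: t) q 0 ≤ PySem.List.pyGetD (a :: t) p 0))
    (hb : ∀ j ∈ l, 0 ≤ j ∧ j < ((t.length + 1 : Nat) : Int))
    (hc : ∀ k : Nat, k < mi → (k : Int) ∈ l) :
    (l.foldl (fun (s : Int × Int) j =>
        if j < s.2 then (s.1 + PySem.List.pyGetD (a :: t) j 0 * (s.2 - j), j) else s)
      (total, (mi : Int))).1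
    = total + ∑ i ∈ Finset.range mi, (a :: pml a t).getD i 0 := by
  induction l generalizing total mi with
  | nil =>
    have : mi = 0 := by
      by_contra h
      exact absurd (hc 0 (by omega)) (by simp)
    simp [this]
  | cons j l ih =>
    rw [List.pairwise_cons] at hp
    simp only [List.foldl_cons]
    by_cases hlt : j < (mi : Int)
    · rw [if_pos hlt]
      have hj0 : 0 ≤ j := (hb j (by simp)).1
      set jn := j.toNat with hjn
      have hjc : (jn : Int) = j := Int.toNat_of_nonneg hj0
      have hjm : jn < mi := by omega
      have ihres := ih (total + PySem.List.pyGetD (a :: t) j 0 * ((mi : Int) - j)) jn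
        (by omega) hp.2 (fun x hx => hb x (by simp [hx]))
        (fun k hk => by
          have hm : (k : Int) ∈ j :: l := hc k (by omega)
          rw [List.mem_cons] at hm
          rcases hm with heq | h
          · omega
          · exact h)
      rw [hjc] at ihres
      rw [ihres]
      -- the interval [jn, mi) all has prefix max = arr[jn] = key j
      have hkey : ∀ i ∈ Finset.Ico jn mi, (a :: pml a t).getD i 0 = (a :: t).getD jn 0 := by
        intro i hi
        rw [Finset.mem_Ico] at hi
        refine pm_exact a t jn i hi.1 (by omega) ?_
        intro k hk
        have hkm : (k : Int) ∈ j :: l := hc k (by omega)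
        have hgd : ∀ m : Nat, PySem.List.pyGetD (a :: t) (m : Int) 0 = (a :: t).getD m 0 := by
          intro m; simp [PySem.List.pyGetD_natCast]
        rw [List.mem_cons] at hkm
        rcases hkm with heq | h
        · have : k = jn := by omega
          simp [this]
        · have := hp.1 _ h
          rw [hgd k] at this
          have hj' : PySem.List.pyGetD (a :: t) j 0 = (a :: t).getD jn 0 := by
            rw [← hjc, hgd jn]
          rw [hj'] at this
          exact this
      have hsplit : ∑ i ∈ Finset.range mi, (a :: pml a t).getD i 0
          = (∑ i ∈ Finset.range jn, (a :: pml a t).getD i 0)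
            + ∑ i ∈ Finset.Ico jn mi, (a :: pml a t).getD i 0 := by
        rw [Finset.range_eq_Ico]
        exact (Finset.sum_Ico_consecutive _ (Nat.zero_le jn) (le_of_lt hjm)).symm
      have hconst : ∑ i ∈ Finset.Ico jn mi, (a :: pml a t).getD i 0
          = (mi - jn : Nat) * (a :: t).getD jn 0 := by
        rw [Finset.sum_congr rfl hkey]
        simp [Nat.card_Ico]
      have hj' : PySem.List.pyGetD (a :: t) j 0 = (a :: t).getD jn 0 := by
        rw [← hjc]; simp [PySem.List.pyGetD_natCast]
      rw [hsplit, hconst, hj']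
      have hcast : ((mi - jn : Nat) : Int) = (mi : Int) - (jn : Int) := by omega
      rw [hcast, hjc]
      ring
    · rw [if_neg hlt]
      exact ih total mi hmi hp.2 (fun x hx => hb x (by simp [hx]))
        (fun k hk => by
          have hm : (k : Int) ∈ j :: l := hc k hk
          rw [List.mem_cons] at hm
          rcases hm with heq | h
          · exfalso; omega
          · exact h)

-- sum of a list as a range-sum of getD.
theorem sum_getD (l : List Int) : ∑ i ∈ Finset.range l.length, l.getD i 0 = l.sum := by
  induction l with
  | nil => simp
  | cons x t ih =>
    rw [List.length_cons, Finset.sum_range_succ']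
    simp only [List.getD_cons_succ, List.getD_cons_zero, List.sum_cons]
    rw [ih]; ring

-- B equals prefix-max-sum minus sum on any nonempty list.
theorem compute_alt_eq (a : Int) (t : List Int) :
    compute_alt (a :: t) = (a :: pml a t).sum - (a :: t).sum := by
  unfold compute_alt
  have hlen : ((a :: t).length : Int) = ((t.length + 1 : Nat) : Int) := by simp
  set key : Int → Int := fun i => PySem.List.pyGetD (a :: t) i 0 with hkey
  set order := PySem.List.sorted (PySem.List.pyRange 0 (a :: t).length 1) key true with horder
  have hp : order.Pairwise (fun p q => key q ≤ key p) := PySem.List.sorted_pairwise_rev _ _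
  have hmem : ∀ j, j ∈ order ↔ (0 ≤ j ∧ j < ((t.length + 1 : Nat) : Int)) := by
    intro j
    rw [horder, PySem.List.mem_sorted, PySem.List.mem_pyRange_one]
    constructor <;> (intro h; constructor <;> simp_all)
  have := pv_B_inv a t order 0 (t.length + 1) (le_refl _) hp
    (fun j hj => (hmem j).1 hj)
    (fun k hk => (hmem k).2 ⟨by omega, by exact_mod_cast (by omega : (k:Int) < (t.length + 1 : Nat))⟩)
  simp only [List.length_cons] at this ⊢
  rw [this]
  have : ∑ i ∈ Finset.range (t.length + 1), (a :: pml a t).getD i 0 = (a :: pml a t).sum := by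
    have hl : (a :: pml a t).length = t.length + 1 := by simp [length_pml]
    rw [← hl, sum_getD]
  rw [this]
  ring

theorem compute_eq_alt (a : Int) (t : List Int) :
    compute (a :: t) = compute_alt (a :: t) := by
  rw [compute_alt_eq]
  have h0 : PySem.List.pyGet? (a :: t) 0 = some a := by
    simp [PySem.List.pyGet?, PySem.List.pyIdx?]
  cases t with
  | nil =>
    unfold compute
    simp [pml]
  | cons b u =>
    unfold compute
    rw [h0, if_neg (by simp : ¬ (a :: b :: u).length = 1)]
    dsimp only
    have hfold := PySem.List.foldl_pyRange_pyGetD (a :: b :: u) 0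
      (fun (s : Int × Int) x =>
        let mx := if x > s.2 then x else s.2
        (s.1 + (mx - x), mx)) ((0 : Int), a) (a := 1) (by norm_num)
    simp only [PySem.List.len_eq] at hfold
    rw [hfold]
    have hdrop : List.drop (Int.toNat 1) (a :: b :: u) = b :: u := by rfl
    rw [hdrop, pv_A_fold (b :: u) 0 a]
    simp [pml]

-- ===== VERDICT (by name: the statement is the Claim_ definition above) =====
theorem compute_spec : Claim_equal_compute := by
  intro arr _ hpre
  unfold Spec_compute
  cases arr with
  | nil => exact absurd rfl hpre
  | cons a t => exact compute_eq_alt a t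

theorem compute_raises : Claim_raises_compute := by
  unfold Claim_raises_compute
  exact ⟨by intro arr _ h hp; exact hp h, by decide⟩

-- self-check: the raise witness really lies in Raises_ and B's port returns the stated literal there
theorem pvRaiseWitness_ok :
    Raises_compute pvRaiseWitness_compute ∧ compute_alt pvRaiseWitness_compute = pvRaiseWitnessOut_compute := by
  have h := compute_raises
  unfold Claim_raises_compute at h
  exact ⟨h.2.2.1, h.2.2.2⟩
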